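-- pv_equiv track=rewrite | github.com/alekseynp/keras-torchvision | resnet_numpy_to_keras.py | get_conversion_tasks
-- ===== SOURCE A (Python) =====
-- def get_conversion_tasks(config, is_basic):
--     conversion_tasks = [('conv2d', 'conv1', 'conv1'), ('batchnorm', 'bn1', 'bn1'), ]
--
--     conv_counter = 1
--     bn_counter = 1
--     for layer in range(4):
--         if not is_basic or layer > 0:
--             # 0th layer of basic doesn't have a downsample
--             conversion_tasks.append(
--                 ('conv2d',
--                  'conv2d_{}'.format(conv_counter),
--                  'layer{}.0.downsample.0'.format(layer + 1)))
--             conv_counter += 1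
--             conversion_tasks.append(
--                 ('batchnorm',
--                  'batch_normalization_{}'.format(bn_counter),
--                  'layer{}.0.downsample.1'.format(layer + 1)))
--             bn_counter += 1
--         for block in range(config[layer]):
--             for conv_bn in range(2 if is_basic else 3):
--                 conversion_tasks.append(('conv2d', 'conv2d_{}'.format(conv_counter),
--                                          'layer{}.{}.conv{}'.format(layer + 1, block, conv_bn + 1)))
--                 conv_counter += 1
--                 conversion_tasks.append(('batchnorm', 'batch_normalization_{}'.format(bn_counter),
--                                          'layer{}.{}.bn{}'.format(layer + 1, block, conv_bn + 1)))
--                 bn_counter += 1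
--
--     conversion_tasks.append(('dense', 'dense_1', 'fc'))
--
--     return conversion_tasks
-- ===== SOURCE B (Python) =====
-- def get_conversion_tasks(config, is_basic):
--     # Pass 1: walk the structure, collecting one (conv_dest, bn_dest) pair per
--     # conv/bn unit -- no running counters.
--     per_block = 2 if is_basic else 3
--     pairs = []
--     for layer in range(4):
--         if not is_basic or layer > 0:
--             pairs.append(('layer{}.0.downsample.0'.format(layer + 1),
--                           'layer{}.0.downsample.1'.format(layer + 1)))
--         for block in range(config[layer]):
--             for conv_bn in range(per_block):
--                 pairs.append(('layer{}.{}.conv{}'.format(layer + 1, block, conv_bn + 1),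
--                               'layer{}.{}.bn{}'.format(layer + 1, block, conv_bn + 1)))
--     # Pass 2: numbering -- conv and bn indices advance in lockstep, so one
--     # enumerate numbers both sides of each pair.
--     tasks = [('conv2d', 'conv1', 'conv1'), ('batchnorm', 'bn1', 'bn1')]
--     for i, (conv_dest, bn_dest) in enumerate(pairs, 1):
--         tasks.append(('conv2d', 'conv2d_{}'.format(i), conv_dest))
--         tasks.append(('batchnorm', 'batch_normalization_{}'.format(i), bn_dest))
--     tasks.append(('dense', 'dense_1', 'fc'))
--     return tasks
-- ===== Notes on version B (the rewrite author's own statement) =====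
-- stated objective: alternative
-- what changed: B separates the structure walk (collecting ordered (conv_dest, bn_dest) pairs with no counters) from a second numbering pass that enumerates the pairs once, exploiting that conv and bn indices advance in lockstep, instead of A's single pass threading two mutable counters.
-- outside the precondition, e.g. on get_conversion_tasks([1, 2, 3], False): A raises IndexError, B raises IndexError
import Mathlib
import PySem

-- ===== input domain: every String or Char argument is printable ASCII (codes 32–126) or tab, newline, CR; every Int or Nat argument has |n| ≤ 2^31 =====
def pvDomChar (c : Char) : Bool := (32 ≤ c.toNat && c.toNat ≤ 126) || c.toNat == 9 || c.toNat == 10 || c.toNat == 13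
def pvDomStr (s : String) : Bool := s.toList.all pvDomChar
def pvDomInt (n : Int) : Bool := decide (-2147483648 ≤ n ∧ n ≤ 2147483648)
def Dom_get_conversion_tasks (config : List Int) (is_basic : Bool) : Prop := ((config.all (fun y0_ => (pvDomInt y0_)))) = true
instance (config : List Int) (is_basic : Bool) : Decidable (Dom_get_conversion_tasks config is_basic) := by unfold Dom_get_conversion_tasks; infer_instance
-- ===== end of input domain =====

-- B replaces A's single pass with two mutable counters by a structure walk collecting
-- (conv_dest, bn_dest) pairs followed by a separate numbering pass over enumerate(pairs, 1).

-- ===== PORT A =====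
-- the three nested loop bodies of A, as named fold bodies over the state
-- (conversion_tasks, conv_counter, bn_counter)
def pvA_convbn (layer block : Int)
    (st : List (String × String × String) × Int × Int) (conv_bn : Int) :
    List (String × String × String) × Int × Int :=
  let st := (st.1 ++ [("conv2d", "conv2d_" ++ PySem.Int.toStr st.2.1,
      "layer" ++ PySem.Int.toStr (layer + 1) ++ "." ++ PySem.Int.toStr block ++ ".conv" ++ PySem.Int.toStr (conv_bn + 1))],
    st.2.1 + 1, st.2.2)
  (st.1 ++ [("batchnorm", "batch_normalization_" ++ PySem.Int.toStr st.2.2,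
      "layer" ++ PySem.Int.toStr (layer + 1) ++ "." ++ PySem.Int.toStr block ++ ".bn" ++ PySem.Int.toStr (conv_bn + 1))],
    st.2.1, st.2.2 + 1)

def pvA_block (is_basic : Bool) (layer : Int)
    (st : List (String × String × String) × Int × Int) (block : Int) :
    List (String × String × String) × Int × Int :=
  (PySem.List.pyRange 0 (if is_basic then 2 else 3) 1).foldl (pvA_convbn layer block) st

def pvA_layer (config : List Int) (is_basic : Bool)
    (st : List (String × String × String) × Int × Int) (layer : Int) :
    List (String × String × String) × Int × Int :=
  let st :=
    if is_basic = false ∨ 0 < layer then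
      let st := (st.1 ++ [("conv2d", "conv2d_" ++ PySem.Int.toStr st.2.1,
          "layer" ++ PySem.Int.toStr (layer + 1) ++ ".0.downsample.0")], st.2.1 + 1, st.2.2)
      (st.1 ++ [("batchnorm", "batch_normalization_" ++ PySem.Int.toStr st.2.2,
          "layer" ++ PySem.Int.toStr (layer + 1) ++ ".0.downsample.1")], st.2.1, st.2.2 + 1)
    else st
  -- config[layer]: pyGetD is exact here — Pre_ guarantees 4 ≤ config.length and layer ∈ [0,4)
  (PySem.List.pyRange 0 (PySem.List.pyGetD config layer 0) 1).foldl (pvA_block is_basic layer) st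

def get_conversion_tasks (config : List Int) (is_basic : Bool) : List (String × String × String) :=
  let st := (PySem.List.pyRange 0 4 1).foldl (pvA_layer config is_basic)
    ([("conv2d", "conv1", "conv1"), ("batchnorm", "bn1", "bn1")], 1, 1)
  st.1 ++ [("dense", "dense_1", "fc")]

-- ===== PORT B =====
-- pass 1: collect (conv_dest, bn_dest) pairs, no counters
def pvB_pair_convbn (layer block : Int) (ps : List (String × String)) (conv_bn : Int) :
    List (String × String) :=
  ps ++ [("layer" ++ PySem.Int.toStr (layer + 1) ++ "." ++ PySem.Int.toStr block ++ ".conv" ++ PySem.Int.toStr (conv_bn + 1),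
          "layer" ++ PySem.Int.toStr (layer + 1) ++ "." ++ PySem.Int.toStr block ++ ".bn" ++ PySem.Int.toStr (conv_bn + 1))]

def pvB_pair_block (per_block layer : Int) (ps : List (String × String)) (block : Int) :
    List (String × String) :=
  (PySem.List.pyRange 0 per_block 1).foldl (pvB_pair_convbn layer block) ps

def pvB_pair_layer (config : List Int) (is_basic : Bool) (per_block : Int)
    (ps : List (String × String)) (layer : Int) : List (String × String) :=
  let ps :=
    if is_basic = false ∨ 0 < layer then
      ps ++ [("layer" ++ PySem.Int.toStr (layer + 1) ++ ".0.downsample.0",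
              "layer" ++ PySem.Int.toStr (layer + 1) ++ ".0.downsample.1")]
    else ps
  -- config[layer]: pyGetD is exact here — Pre_ guarantees 4 ≤ config.length and layer ∈ [0,4)
  (PySem.List.pyRange 0 (PySem.List.pyGetD config layer 0) 1).foldl (pvB_pair_block per_block layer) ps

-- pass 2: numbering body of 'for i, (conv_dest, bn_dest) in enumerate(pairs, 1)'
def pvB_number (tasks : List (String × String × String)) (p : Int × String × String) :
    List (String × String × String) :=
  tasks ++ [("conv2d", "conv2d_" ++ PySem.Int.toStr p.1, p.2.1),
            ("batchnorm", "batch_normalization_" ++ PySem.Int.toStr p.1, p.2.2)]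

def get_conversion_tasks_alt (config : List Int) (is_basic : Bool) : List (String × String × String) :=
  let per_block : Int := if is_basic then 2 else 3
  let pairs := (PySem.List.pyRange 0 4 1).foldl (pvB_pair_layer config is_basic per_block) []
  let tasks := (PySem.List.enumerate pairs 1).foldl pvB_number
    [("conv2d", "conv1", "conv1"), ("batchnorm", "bn1", "bn1")]
  tasks ++ [("dense", "dense_1", "fc")]

-- ===== PRECONDITION & SPEC =====
-- A reads config[0..3]; on shorter lists Python raises IndexError.
def Pre_get_conversion_tasks (config : List Int) (is_basic : Bool) : Prop := 4 ≤ config.length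
instance (config : List Int) (is_basic : Bool) : Decidable (Pre_get_conversion_tasks config is_basic) := by
  unfold Pre_get_conversion_tasks; infer_instance

def pvWitness_get_conversion_tasks : List Int × Bool := ([2, 2, 2, 2], true)

def Spec_get_conversion_tasks (config : List Int) (is_basic : Bool) (out : List (String × String × String)) : Prop := out = get_conversion_tasks_alt config is_basic
instance (config : List Int) (is_basic : Bool) (out : List (String × String × String)) : Decidable (Spec_get_conversion_tasks config is_basic out) := by unfold Spec_get_conversion_tasks; infer_instance

-- ===== CLAIM (what is proved, stated in full; the proofs are below) =====
def Claim_equal_get_conversion_tasks : Prop := ∀ (config : List Int) (is_basic : Bool), Dom_get_conversion_tasks config is_basic → Pre_get_conversion_tasks config is_basic → Spec_get_conversion_tasks config is_basic (get_conversion_tasks config is_basic)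

-- ===== LEMMAS AND PROOFS =====

-- numbering of a pair list starting at counter c
def pvNumber (c : Int) : List (String × String) → List (String × String × String)
  | [] => []
  | p :: t => ("conv2d", "conv2d_" ++ PySem.Int.toStr c, p.1) ::
      ("batchnorm", "batch_normalization_" ++ PySem.Int.toStr c, p.2) :: pvNumber (c + 1) t

theorem pvNumber_append (c : Int) (ps qs : List (String × String)) :
    pvNumber c (ps ++ qs) = pvNumber c ps ++ pvNumber (c + ps.length) qs := by
  induction ps generalizing c with
  | nil => simp [pvNumber]
  | cons p t ih =>
    simp only [List.cons_append, pvNumber, ih, List.length_cons]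
    have h : c + ((t.length : Int) + 1) = c + 1 + (t.length : Int) := by ring
    simp [h]

-- A's state shape: acting on a state with equal counters, F appends the
-- numbered entries of P and advances both counters by |P|.
def pvShape (F : List (String × String × String) × Int × Int → List (String × String × String) × Int × Int)
    (P : List (String × String)) : Prop :=
  ∀ acc c, F (acc, c, c) = (acc ++ pvNumber c P, c + P.length, c + P.length)

theorem pvShape_comp {F G : List (String × String × String) × Int × Int → List (String × String × String) × Int × Int}
    {P Q : List (String × String)} (hF : pvShape F P) (hG : pvShape G Q) :
    pvShape (fun st => G (F st)) (P ++ Q) := by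
  intro acc c
  show G (F (acc, c, c)) = (acc ++ pvNumber c (P ++ Q), c + ((P ++ Q).length : Int), c + ((P ++ Q).length : Int))
  rw [hF acc c, hG, pvNumber_append]
  simp only [List.append_assoc, Prod.mk.injEq, List.length_append]
  refine ⟨trivial, by push_cast; ring, by push_cast; ring⟩

theorem pvShape_foldl (f : List (String × String × String) × Int × Int → Int → List (String × String × String) × Int × Int)
    (g : Int → List (String × String)) (L : List Int)
    (h : ∀ x ∈ L, pvShape (fun st => f st x) (g x)) :
    pvShape (fun st => L.foldl f st) (L.flatMap g) := by
  induction L with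
  | nil => intro acc c; simp [pvNumber]
  | cons x t ih =>
    have hx := h x (List.mem_cons_self ..)
    have ht := ih (fun y hy => h y (List.mem_cons_of_mem _ hy))
    have := pvShape_comp hx ht
    intro acc c
    simpa [List.flatMap_cons] using this acc c

-- B's pair-list shape: F appends P.
def pvAppShape (F : List (String × String) → List (String × String)) (P : List (String × String)) : Prop :=
  ∀ acc, F acc = acc ++ P

theorem pvAppShape_foldl (f : List (String × String) → Int → List (String × String))
    (g : Int → List (String × String)) (L : List Int)
    (h : ∀ x ∈ L, pvAppShape (fun ps => f ps x) (g x)) :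
    pvAppShape (fun ps => L.foldl f ps) (L.flatMap g) := by
  induction L with
  | nil => intro acc; simp
  | cons x t ih =>
    have hx := h x (List.mem_cons_self ..)
    have ht := ih (fun y hy => h y (List.mem_cons_of_mem _ hy))
    intro acc
    have h1 : f acc x = acc ++ g x := hx acc
    have h2 : List.foldl f (acc ++ g x) t = (acc ++ g x) ++ List.flatMap g t := ht (acc ++ g x)
    simp [List.foldl_cons, h1, h2, List.flatMap_cons]

-- the pair list contributed by one layer (shared characterisation of both ports)
def pvPairsConvbn (layer block conv_bn : Int) : List (String × String) :=
  [("layer" ++ PySem.Int.toStr (layer + 1) ++ "." ++ PySem.Int.toStr block ++ ".conv" ++ PySem.Int.toStr (conv_bn + 1),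
    "layer" ++ PySem.Int.toStr (layer + 1) ++ "." ++ PySem.Int.toStr block ++ ".bn" ++ PySem.Int.toStr (conv_bn + 1))]

def pvPairsBlock (is_basic : Bool) (layer block : Int) : List (String × String) :=
  (PySem.List.pyRange 0 (if is_basic then 2 else 3) 1).flatMap (pvPairsConvbn layer block)

def pvPairsLayer (config : List Int) (is_basic : Bool) (layer : Int) : List (String × String) :=
  (if is_basic = false ∨ 0 < layer then
      [("layer" ++ PySem.Int.toStr (layer + 1) ++ ".0.downsample.0",
        "layer" ++ PySem.Int.toStr (layer + 1) ++ ".0.downsample.1")]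
    else []) ++
  (PySem.List.pyRange 0 (PySem.List.pyGetD config layer 0) 1).flatMap (pvPairsBlock is_basic layer)

theorem pvShape_convbn (layer block conv_bn : Int) :
    pvShape (fun st => pvA_convbn layer block st conv_bn) (pvPairsConvbn layer block conv_bn) := by
  intro acc c
  simp [pvA_convbn, pvPairsConvbn, pvNumber]

theorem pvShape_block (is_basic : Bool) (layer block : Int) :
    pvShape (fun st => pvA_block is_basic layer st block) (pvPairsBlock is_basic layer block) :=
  pvShape_foldl _ _ _ (fun cb _ => pvShape_convbn layer block cb)

theorem pvShape_layer (config : List Int) (is_basic : Bool) (layer : Int) :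
    pvShape (fun st => pvA_layer config is_basic st layer) (pvPairsLayer config is_basic layer) := by
  intro acc c
  have hblocks := pvShape_foldl (pvA_block is_basic layer) (pvPairsBlock is_basic layer)
    (PySem.List.pyRange 0 (PySem.List.pyGetD config layer 0) 1)
    (fun b _ => pvShape_block is_basic layer b)
  simp only [pvShape] at hblocks
  by_cases h : is_basic = false ∨ 0 < layer
  · simp only [pvA_layer, if_pos h, pvPairsLayer]
    rw [hblocks]
    simp [pvNumber]
    all_goals ring
  · simp only [pvA_layer, if_neg h, pvPairsLayer]
    rw [hblocks]
    simp

theorem pvB_pairLayer_shape (config : List Int) (is_basic : Bool) (layer : Int) :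
    pvAppShape (fun ps => pvB_pair_layer config is_basic (if is_basic then 2 else 3) ps layer)
      (pvPairsLayer config is_basic layer) := by
  intro acc
  have hblocks := pvAppShape_foldl (pvB_pair_block (if is_basic then 2 else 3) layer)
    (pvPairsBlock is_basic layer)
    (PySem.List.pyRange 0 (PySem.List.pyGetD config layer 0) 1)
    (fun b _ => pvAppShape_foldl (pvB_pair_convbn layer b) (pvPairsConvbn layer b) _
      (fun cb _ => fun ps => by simp [pvB_pair_convbn, pvPairsConvbn]))
  simp only [pvAppShape] at hblocks
  by_cases h : is_basic = false ∨ 0 < layer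
  · simp only [pvB_pair_layer, if_pos h, pvPairsLayer]
    rw [hblocks]
    simp
  · simp only [pvB_pair_layer, if_neg h, pvPairsLayer]
    rw [hblocks]
    simp

theorem pvNumber_enumerate (ps : List (String × String)) (s : Int)
    (acc : List (String × String × String)) :
    (PySem.List.enumerate ps s).foldl pvB_number acc = acc ++ pvNumber s ps := by
  induction ps generalizing s acc with
  | nil => simp [PySem.List.enumerate_nil, pvNumber]
  | cons p t ih =>
    simp [PySem.List.enumerate_cons, pvB_number, ih, pvNumber]

-- ===== VERDICT (by name: the statement is the Claim_ definition above) =====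
theorem get_conversion_tasks_spec : Claim_equal_get_conversion_tasks := by
  intro config is_basic _ _
  unfold Spec_get_conversion_tasks
  have hA := pvShape_foldl (pvA_layer config is_basic) (pvPairsLayer config is_basic)
    (PySem.List.pyRange 0 4 1) (fun l _ => pvShape_layer config is_basic l)
  have hB := pvAppShape_foldl (pvB_pair_layer config is_basic (if is_basic then 2 else 3))
    (pvPairsLayer config is_basic) (PySem.List.pyRange 0 4 1)
    (fun l _ => pvB_pairLayer_shape config is_basic l)
  simp only [pvShape, pvAppShape] at hA hB
  show get_conversion_tasks config is_basic = get_conversion_tasks_alt config is_basic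
  unfold get_conversion_tasks get_conversion_tasks_alt
  rw [hA]
  simp [hB, pvNumber_enumerate]
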